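-- pv_equiv track=rewrite | github.com/Yyuxin0822/LLM_EcoCircuit | flaskr/__io.py | sortnode
-- ===== SOURCE A (Python) =====
-- def sortnode(nodelist, nodesys, syscolor):
--     """
--     group nodelist by system, order them alphabetically according to the system order and then node name
--     Args:
--         nodelist(list) - list of nodes
--         nodesys(dict) - {node:system}
--         syscolor(dict) - {system:color}
--     Return:
--         reordered list of nodes
--     """
--     nodecolor = {node: syscolor[nodesys[node]] for node in nodelist if node in nodesys}
--     system_node_pairs = [
--         (nodecolor[node], node) for node in nodelist if node in nodesys
--     ]
--     sorted_pairs = sorted(system_node_pairs)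
--     sorted_nodelist = [node for system, node in sorted_pairs]
--     return sorted_nodelist
-- ===== SOURCE B (Python) =====
-- def sortnode(nodelist, nodesys, syscolor):
--     """
--     Group nodes into buckets keyed by their system's color, then emit the
--     buckets in sorted color order, each bucket sorted by node name.
--     """
--     buckets = {}
--     for node in nodelist:
--         if node in nodesys:
--             color = syscolor[nodesys[node]]
--             buckets[color] = buckets.get(color, []) + [node]
--     result = []
--     for color in sorted(buckets):
--         result += sorted(buckets[color])
--     return result
-- ===== Notes on version B (the rewrite author's own statement) =====
-- stated objective: alternative
-- what changed: replaces the single lexicographic sort of (color, node) pairs by a one-pass grouping dict from color to its nodes, then concatenates the per-color alphabetically sorted buckets in sorted color order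
import Mathlib
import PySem

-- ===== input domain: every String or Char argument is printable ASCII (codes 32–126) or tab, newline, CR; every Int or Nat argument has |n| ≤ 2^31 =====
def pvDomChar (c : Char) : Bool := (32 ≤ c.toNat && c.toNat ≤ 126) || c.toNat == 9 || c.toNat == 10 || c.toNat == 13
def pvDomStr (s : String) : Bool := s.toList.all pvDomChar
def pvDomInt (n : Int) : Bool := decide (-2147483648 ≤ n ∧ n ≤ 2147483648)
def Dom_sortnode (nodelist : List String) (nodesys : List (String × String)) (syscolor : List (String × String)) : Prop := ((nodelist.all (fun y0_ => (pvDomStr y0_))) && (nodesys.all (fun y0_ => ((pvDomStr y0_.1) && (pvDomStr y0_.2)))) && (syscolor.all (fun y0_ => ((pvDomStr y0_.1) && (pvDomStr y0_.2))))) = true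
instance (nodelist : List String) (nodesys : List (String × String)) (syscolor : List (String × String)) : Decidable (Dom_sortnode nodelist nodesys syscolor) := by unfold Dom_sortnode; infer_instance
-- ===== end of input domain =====

-- B groups nodes into buckets keyed by system color and concatenates the per-color sorted buckets
-- in sorted color order, instead of A's single lexicographic sort of (color, node) pairs; same cost,
-- different algorithm (objective: alternative).

-- ===== PORT A =====
def sortnode (nodelist : List String) (nodesys : List (String × String)) (syscolor : List (String × String)) : List String :=
  let ns := PySem.Dict.mk nodesys
  let sc := PySem.Dict.mk syscolor
  -- nodecolor = {node: syscolor[nodesys[node]] for node in nodelist if node in nodesys}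
  -- (the .getD "" defaults are never used on inputs satisfying Pre_sortnode, where Python would raise KeyError)
  let nodecolor := nodelist.foldl (fun d node =>
    if ns.contains node then d.insert node ((sc.get? ((ns.get? node).getD "")).getD "") else d) PySem.Dict.empty
  -- system_node_pairs = [(nodecolor[node], node) for node in nodelist if node in nodesys]
  let pairs := nodelist.foldl (fun acc node =>
    if ns.contains node then acc ++ [(nodecolor.getD node "", node)] else acc) []
  -- sorted_pairs = sorted(system_node_pairs)  (Python tuple order)
  let sortedPairs := PySem.List.sorted2 pairs (fun q => q.1) (fun q => q.2) false
  sortedPairs.map (fun q => q.2)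

-- ===== PORT B =====
def sortnode_alt (nodelist : List String) (nodesys : List (String × String)) (syscolor : List (String × String)) : List String :=
  let ns := PySem.Dict.mk nodesys
  let sc := PySem.Dict.mk syscolor
  -- for node in nodelist: if node in nodesys: color = sc[ns[node]]; buckets[color] = buckets.get(color, []) + [node]
  let buckets := nodelist.foldl (fun d node =>
    if ns.contains node then
      d.modify ((sc.get? ((ns.get? node).getD "")).getD "") [] (fun l => l ++ [node])
    else d) PySem.Dict.empty
  -- for color in sorted(buckets): result += sorted(buckets[color])
  (PySem.List.sorted buckets.keys (fun c => c) false).foldl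
    (fun acc c => acc ++ PySem.List.sorted (buckets.getD c []) (fun n => n) false) []

-- ===== PRECONDITION & SPEC =====
-- Pre_ excludes exactly the inputs where Python raises KeyError: a node of nodelist that is a key of
-- nodesys whose system is not a key of syscolor.
def Pre_sortnode (nodelist : List String) (nodesys : List (String × String)) (syscolor : List (String × String)) : Prop :=
  ∀ node ∈ nodelist, (PySem.Dict.mk nodesys).contains node = true →
    (PySem.Dict.mk syscolor).contains (((PySem.Dict.mk nodesys).get? node).getD "") = true
instance (nodelist : List String) (nodesys : List (String × String)) (syscolor : List (String × String)) : Decidable (Pre_sortnode nodelist nodesys syscolor) := by unfold Pre_sortnode; infer_instance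

def pvWitness_sortnode : List String × (List (String × String)) × (List (String × String)) :=
  (["b", "a", "c"], [("a", "s1"), ("b", "s2"), ("c", "s1")], [("s1", "red"), ("s2", "blue")])

def Spec_sortnode (nodelist : List String) (nodesys : List (String × String)) (syscolor : List (String × String)) (out : List String) : Prop := out = sortnode_alt nodelist nodesys syscolor
instance (nodelist : List String) (nodesys : List (String × String)) (syscolor : List (String × String)) (out : List String) : Decidable (Spec_sortnode nodelist nodesys syscolor out) := by unfold Spec_sortnode; infer_instance

-- ===== CLAIM (what is proved, stated in full; the proofs are below) =====
def Claim_equal_sortnode : Prop := ∀ (nodelist : List String) (nodesys : List (String × String)) (syscolor : List (String × String)), Dom_sortnode nodelist nodesys syscolor → Pre_sortnode nodelist nodesys syscolor → Spec_sortnode nodelist nodesys syscolor (sortnode nodelist nodesys syscolor)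

-- ===== LEMMAS AND PROOFS =====

-- Python's lexicographic order on string pairs, and sorted2's comparator
def lexLe (a b : String × String) : Prop := a.1 < b.1 ∨ (a.1 = b.1 ∧ a.2 ≤ b.2)
def pvLt (a b : String × String) : Bool :=
  decide (a.1 < b.1) || (!decide (b.1 < a.1) && decide (a.2 < b.2))

theorem lexLe_of_pvLt {a b : String × String} (h : pvLt a b = true) : lexLe a b := by
  unfold pvLt at h; unfold lexLe
  simp only [Bool.or_eq_true, Bool.and_eq_true, Bool.not_eq_true', decide_eq_true_eq,
    decide_eq_false_iff_not] at h
  rcases h with h | ⟨h1, h2⟩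
  · exact Or.inl h
  · rcases lt_or_eq_of_le (not_lt.mp h1) with h | h
    · exact Or.inl h
    · exact Or.inr ⟨h, le_of_lt h2⟩

theorem lexLe_of_not_pvLt {a b : String × String} (h : pvLt a b = false) : lexLe b a := by
  unfold pvLt at h; unfold lexLe
  simp only [Bool.or_eq_false_iff, Bool.and_eq_false_iff, Bool.not_eq_false', decide_eq_true_eq,
    decide_eq_false_iff_not] at h
  rcases h with ⟨h1, h2⟩
  rcases lt_or_eq_of_le (not_lt.mp h1) with h | h
  · exact Or.inl h
  · rcases h2 with h2 | h2
    · exact absurd h2 (by rw [h]; exact lt_irrefl _)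
    · exact Or.inr ⟨h, not_lt.mp h2⟩

theorem lexLe_trans {a b c : String × String} (h1 : lexLe a b) (h2 : lexLe b c) : lexLe a c := by
  unfold lexLe at *
  rcases h1 with h1 | ⟨h1, h1'⟩ <;> rcases h2 with h2 | ⟨h2, h2'⟩
  · exact Or.inl (lt_trans h1 h2)
  · exact Or.inl (lt_of_lt_of_le h1 (le_of_eq h2))
  · exact Or.inl (lt_of_le_of_lt (le_of_eq h1) h2)
  · exact Or.inr ⟨h1.trans h2, le_trans h1' h2'⟩

theorem lexLe_antisymm {a b : String × String} (h1 : lexLe a b) (h2 : lexLe b a) : a = b := by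
  unfold lexLe at *
  rcases h1 with h1 | ⟨h1, h1'⟩ <;> rcases h2 with h2 | ⟨h2, h2'⟩
  · exact absurd h2 (lt_asymm h1)
  · exact absurd h1 (h2 ▸ lt_irrefl _)
  · exact absurd h2 (h1 ▸ lt_irrefl _)
  · exact Prod.ext h1 (le_antisymm h1' h2')

theorem pairwise_insertBy_lex (x : String × String) (ys : List (String × String))
    (h : ys.Pairwise lexLe) : (PySem.List.insertBy pvLt x ys).Pairwise lexLe := by
  induction ys with
  | nil => simp [PySem.List.insertBy]
  | cons y ys ih =>
    rw [List.pairwise_cons] at h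
    by_cases hb : pvLt x y = true
    · simp only [PySem.List.insertBy, hb, if_true]
      refine List.Pairwise.cons ?_ (List.Pairwise.cons h.1 h.2)
      intro z hz
      rcases List.mem_cons.mp hz with rfl | hz
      · exact lexLe_of_pvLt hb
      · exact lexLe_trans (lexLe_of_pvLt hb) (h.1 z hz)
    · simp only [PySem.List.insertBy, hb]
      refine List.Pairwise.cons ?_ (ih h.2)
      intro z hz
      rcases (PySem.List.insertBy_mem_iff pvLt x z ys).mp hz with rfl | hz
      · exact lexLe_of_not_pvLt (Bool.eq_false_iff.mpr hb)
      · exact h.1 z hz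

theorem pairwise_foldl_insertBy_lex (P : List (String × String)) (acc : List (String × String))
    (h : acc.Pairwise lexLe) :
    (P.foldl (fun acc x => PySem.List.insertBy pvLt x acc) acc).Pairwise lexLe := by
  induction P generalizing acc with
  | nil => exact h
  | cons x P ih => exact ih _ (pairwise_insertBy_lex x acc h)

theorem sorted2_eq_foldl (P : List (String × String)) :
    PySem.List.sorted2 P (fun q => q.1) (fun q => q.2) false =
      P.foldl (fun acc x => PySem.List.insertBy pvLt x acc) [] := rfl

theorem sorted2_pairwise_lex (P : List (String × String)) :
    (PySem.List.sorted2 P (fun q => q.1) (fun q => q.2) false).Pairwise lexLe := by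
  rw [sorted2_eq_foldl]; exact pairwise_foldl_insertBy_lex P [] List.Pairwise.nil

-- a dict built by inserting a key-determined value: lookups
theorem getD_foldl_insert_of_not_mem {κ ν : Type} [BEq κ] [LawfulBEq κ] (g : κ → ν)
    (l : List κ) (d : PySem.Dict κ ν) (n : κ) (dflt : ν) (h : n ∉ l) :
    (l.foldl (fun d x => d.insert x (g x)) d).getD n dflt = d.getD n dflt := by
  induction l generalizing d with
  | nil => rfl
  | cons x l ih =>
    simp only [List.foldl_cons]
    rw [ih _ (fun hm => h (List.mem_cons_of_mem _ hm)),
      PySem.Dict.getD_insert_of_ne d _ _ (fun he => h (by rw [he]; exact List.mem_cons_self))]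

theorem getD_foldl_insert_of_mem {κ ν : Type} [BEq κ] [LawfulBEq κ] (g : κ → ν)
    (l : List κ) (d : PySem.Dict κ ν) (n : κ) (dflt : ν) (h : n ∈ l) :
    (l.foldl (fun d x => d.insert x (g x)) d).getD n dflt = g n := by
  induction l generalizing d with
  | nil => cases h
  | cons x l ih =>
    simp only [List.foldl_cons]
    by_cases hm : n ∈ l
    · exact ih _ hm
    · have hx : n = x := by rcases List.mem_cons.mp h with h | h; exact h; exact absurd h hm
      subst hx
      rw [getD_foldl_insert_of_not_mem _ _ _ _ _ hm, PySem.Dict.getD_insert_self]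

-- grouping a pair list by its distinct first components is a permutation of it
theorem flatMap_filter_fst_perm (cs : List String) (P : List (String × String))
    (hnd : cs.Nodup) (hall : ∀ q ∈ P, q.1 ∈ cs) :
    (cs.flatMap (fun c => P.filter (fun q => q.1 == c))).Perm P := by
  induction cs generalizing P with
  | nil =>
    cases P with
    | nil => simp
    | cons q P => exact absurd (hall q List.mem_cons_self) (List.not_mem_nil)
  | cons c cs ih =>
    rw [List.nodup_cons] at hnd
    simp only [List.flatMap_cons]
    have hstep : ∀ c' ∈ cs, P.filter (fun q => q.1 == c') =
        (P.filter (fun q => !(q.1 == c))).filter (fun q => q.1 == c') := by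
      intro c' hc'
      rw [List.filter_filter]
      refine (List.filter_congr ?_).symm
      intro q _
      by_cases hq : q.1 == c'
      · have : ¬(q.1 == c) = true := by
          simp only [beq_iff_eq] at hq ⊢
          exact fun he => hnd.1 (by rw [← he, hq]; exact hc')
        simp [hq, this]
      · simp [hq]
    have hmid : (cs.flatMap (fun c' => P.filter (fun q => q.1 == c'))).Perm
        (P.filter (fun q => !(q.1 == c))) := by
      have he : cs.flatMap (fun c' => P.filter (fun q => q.1 == c')) =
          cs.flatMap (fun c' => (P.filter (fun q => !(q.1 == c))).filter (fun q => q.1 == c')) :=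
        List.flatMap_congr hstep
      rw [he]
      refine ih _ hnd.2 ?_
      intro q hq
      have hq' := List.of_mem_filter hq
      have hmem := List.mem_of_mem_filter hq
      rcases List.mem_cons.mp (hall q hmem) with h | h
      · simp [h] at hq'
      · exact h
    exact (List.Perm.append_left _ hmid).trans (List.filter_append_perm (fun q => q.1 == c) P)

-- filtered pair list at a fixed color
theorem filter_pairs_eq (L : List String) (f : String → String) (c : String) :
    ((L.map (fun n => (f n, n))).filter (fun q => q.1 == c)) =
      (L.filter (fun n => f n == c)).map (fun n => (c, n)) := by
  rw [List.filter_map]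
  have : ((fun q : String × String => q.1 == c) ∘ (fun n => (f n, n))) = fun n => f n == c := rfl
  rw [this]
  refine List.map_congr_left ?_
  intro n hn
  have := List.of_mem_filter hn
  simp only [beq_iff_eq] at this
  rw [this]

-- THE central lemma: sorting (color, node) pairs lexicographically equals concatenating,
-- in sorted color order, the alphabetically sorted per-color node lists.
theorem sorted_pairs_eq_grouped (L : List String) (f : String → String) :
    (PySem.List.sorted2 (L.map (fun n => (f n, n))) (fun q => q.1) (fun q => q.2) false).map (fun q => q.2) =
      (PySem.List.sorted (PySem.Set.ofList (L.map f)) (fun c => c) false).flatMap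
        (fun c => PySem.List.sorted (L.filter (fun n => f n == c)) (fun n => n) false) := by
  set P := L.map (fun n => (f n, n)) with hP
  set cs := PySem.List.sorted (PySem.Set.ofList (L.map f)) (fun c => c) false with hcs
  set M := fun c => PySem.List.sorted (L.filter (fun n => f n == c)) (fun n => n) false with hM
  set ys := cs.flatMap (fun c => (M c).map (fun n => (c, n))) with hys
  have hcs_nodup : cs.Nodup :=
    ((PySem.List.sorted_perm (PySem.Set.ofList (L.map f)) (fun c => c) false).nodup_iff).mpr
      (PySem.Set.nodup_ofList _)
  have hcs_mem : ∀ q ∈ P, q.1 ∈ cs := by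
    intro q hq
    rcases List.mem_map.mp hq with ⟨n, hn, rfl⟩
    rw [hcs, PySem.List.mem_sorted, PySem.Set.mem_ofList]
    exact List.mem_map_of_mem hn
  have hperm : ys.Perm P := by
    have h1 : ys.Perm (cs.flatMap (fun c => P.filter (fun q => q.1 == c))) := by
      refine List.Perm.flatMap_left cs ?_
      intro c hc
      rw [filter_pairs_eq L f c]
      exact List.Perm.map _ (PySem.List.sorted_perm _ _ _)
    exact h1.trans (flatMap_filter_fst_perm cs P hcs_nodup hcs_mem)
  have hys_pw : ys.Pairwise lexLe := by
    rw [hys, List.pairwise_flatMap]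
    constructor
    · intro c _
      refine List.Pairwise.map _ ?_ (PySem.List.sorted_pairwise (L.filter (fun n => f n == c)) (fun n => n))
      intro a b hab
      exact Or.inr ⟨rfl, hab⟩
    · have hlt : cs.Pairwise (fun a b => a < b) := PySem.List.sorted_ofList_pairwise_lt (L.map f)
      refine hlt.imp ?_
      intro c c' hcc x hx y hy
      rcases List.mem_map.mp hx with ⟨n, _, rfl⟩
      rcases List.mem_map.mp hy with ⟨m, _, rfl⟩
      exact Or.inl hcc
  have hmain : PySem.List.sorted2 P (fun q => q.1) (fun q => q.2) false = ys := by
    refine List.Perm.eq_of_pairwise (fun a b _ _ h1 h2 => lexLe_antisymm h1 h2)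
      (sorted2_pairwise_lex P) hys_pw ((PySem.List.sorted2_perm P _ _ false).trans hperm.symm)
  rw [hmain, hys, List.map_flatMap]
  refine List.flatMap_congr ?_
  intro c _
  rw [List.map_map]
  simp

-- port A in closed form
theorem portA_char (nodelist : List String) (nodesys syscolor : List (String × String)) :
    sortnode nodelist nodesys syscolor =
      (PySem.List.sorted2 ((nodelist.filter ((fun node => (PySem.Dict.mk nodesys).contains node))).map
          (fun n => ((fun node => ((PySem.Dict.mk syscolor).get? (((PySem.Dict.mk nodesys).get? node).getD "")).getD "") n, n))) (fun q => q.1) (fun q => q.2) false).map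
        (fun q => q.2) := by
  simp only [sortnode]
  rw [PySem.List.foldl_if_eq_foldl_filter (fun node => (PySem.Dict.mk nodesys).contains node)
      (fun (d : PySem.Dict String String) node => d.insert node (((PySem.Dict.mk syscolor).get? (((PySem.Dict.mk nodesys).get? node).getD "")).getD "")),
    PySem.List.foldl_append_if]
  simp only [List.nil_append]
  refine congrArg (fun P => List.map (fun q : String × String => q.2)
    (PySem.List.sorted2 P (fun q => q.1) (fun q => q.2) false)) ?_
  refine List.map_congr_left ?_
  intro n hn
  rw [getD_foldl_insert_of_mem (fun node => ((PySem.Dict.mk syscolor).get? (((PySem.Dict.mk nodesys).get? node).getD "")).getD "") _ _ _ _ hn]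

-- port B in closed form
theorem portB_char (nodelist : List String) (nodesys syscolor : List (String × String)) :
    sortnode_alt nodelist nodesys syscolor =
      (PySem.List.sorted (PySem.Set.ofList ((nodelist.filter ((fun node => (PySem.Dict.mk nodesys).contains node))).map
          (fun node => ((PySem.Dict.mk syscolor).get? (((PySem.Dict.mk nodesys).get? node).getD "")).getD ""))) (fun c => c) false).flatMap
        (fun c => PySem.List.sorted ((nodelist.filter ((fun node => (PySem.Dict.mk nodesys).contains node))).filter
          (fun n => (fun node => ((PySem.Dict.mk syscolor).get? (((PySem.Dict.mk nodesys).get? node).getD "")).getD "") n == c)) (fun n => n) false) := by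
  simp only [sortnode_alt]
  rw [PySem.List.foldl_if_eq_foldl_filter (fun node => (PySem.Dict.mk nodesys).contains node)
      (fun (d : PySem.Dict String (List String)) node => d.modify (((PySem.Dict.mk syscolor).get? (((PySem.Dict.mk nodesys).get? node).getD "")).getD "") [] (fun l => l ++ [node])),
    PySem.List.foldl_append_eq_flatMap]
  simp only [List.nil_append]
  set L := nodelist.filter ((fun node => (PySem.Dict.mk nodesys).contains node)) with hL
  have hfold : L.foldl (fun d node => d.modify (((PySem.Dict.mk syscolor).get? (((PySem.Dict.mk nodesys).get? node).getD "")).getD "") [] (fun l => l ++ [node]))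
      PySem.Dict.empty =
      (L.map (fun n => ((fun node => ((PySem.Dict.mk syscolor).get? (((PySem.Dict.mk nodesys).get? node).getD "")).getD "") n, n))).foldl
        (fun d q => d.modify q.1 [] (fun l => l ++ [q.2])) PySem.Dict.empty := by
    rw [List.foldl_map]
  have hkeys : (L.foldl (fun d node => d.modify (((PySem.Dict.mk syscolor).get? (((PySem.Dict.mk nodesys).get? node).getD "")).getD "") [] (fun l => l ++ [node]))
      PySem.Dict.empty).keys = PySem.Set.ofList (L.map (fun node => ((PySem.Dict.mk syscolor).get? (((PySem.Dict.mk nodesys).get? node).getD "")).getD "")) := by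
    rw [PySem.Dict.keys_foldl_modify_key L (fun node => ((PySem.Dict.mk syscolor).get? (((PySem.Dict.mk nodesys).get? node).getD "")).getD "") []
      (fun _ node => fun l => l ++ [node]) PySem.Dict.empty, PySem.Dict.keys_empty,
      PySem.Set.update_nil_left]
  have hgetD : ∀ c, (L.foldl (fun d node => d.modify (((PySem.Dict.mk syscolor).get? (((PySem.Dict.mk nodesys).get? node).getD "")).getD "") [] (fun l => l ++ [node]))
      PySem.Dict.empty).getD c [] = L.filter (fun n => (fun node => ((PySem.Dict.mk syscolor).get? (((PySem.Dict.mk nodesys).get? node).getD "")).getD "") n == c) := by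
    intro c
    rw [hfold, PySem.Dict.getD_foldl_modify_append, PySem.Dict.getD_empty, List.nil_append,
      filter_pairs_eq L (fun node => ((PySem.Dict.mk syscolor).get? (((PySem.Dict.mk nodesys).get? node).getD "")).getD "") c, List.map_map]
    simp
  rw [hkeys]
  simp only [hgetD]

-- the two ports agree on every input (the Pre_ hypothesis is not needed for equality of the ports:
-- both compute the same default where Python would raise; Pre_ marks where the PYTHON returns)
theorem ports_agree (nodelist : List String) (nodesys syscolor : List (String × String)) :
    sortnode nodelist nodesys syscolor = sortnode_alt nodelist nodesys syscolor := by
  rw [portA_char, portB_char, sorted_pairs_eq_grouped]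

-- ===== VERDICT (by name: the statement is the Claim_ definition above) =====
theorem sortnode_spec : Claim_equal_sortnode := by
  intro nodelist nodesys syscolor _ _
  unfold Spec_sortnode
  exact ports_agree nodelist nodesys syscolor
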